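-- pv_equiv track=rewrite | github.com/JakubKazimierski/PythonPortfolio | Easy/OverlappingRanges/Superincreasing.py | Superincreasing
-- ===== SOURCE A (Python) =====
-- def Superincreasing(arr):
--     '''
--     Have the function Superincreasing(arr)
--     take the array of numbers stored in arr
--     and determine if the array forms a superincreasing
--     sequence where each element in the array is greater
--     than the sum of all previous elements.
--     The array will only consist of positive integers.
--
--     For example: if arr is [1, 3, 6, 13, 54] then your
--     program should return the string "true" because it
--     forms a superincreasing sequence.
--     If a superincreasing sequence isn't formed,
--     then your program should return the string "false"
--     '''
--
--     try:
--
--         for i in range(1, len(arr)):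
--             if arr[i] <= sum(arr[0:i]):
--                 return "false"
--
--         return "true"
--
--     except TypeError:
--         return -1
-- ===== SOURCE B (Python) =====
-- def Superincreasing(arr):
--     if not arr:
--         return "true"
--     total = arr[0]
--     for x in arr[1:]:
--         if x <= total:
--             return "false"
--         total += x
--     return "true"
-- ===== Notes on version B (the rewrite author's own statement) =====
-- stated objective: faster
-- what changed: B keeps a running prefix sum in one pass instead of re-summing arr[0:i] for every index i.
import Mathlib
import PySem

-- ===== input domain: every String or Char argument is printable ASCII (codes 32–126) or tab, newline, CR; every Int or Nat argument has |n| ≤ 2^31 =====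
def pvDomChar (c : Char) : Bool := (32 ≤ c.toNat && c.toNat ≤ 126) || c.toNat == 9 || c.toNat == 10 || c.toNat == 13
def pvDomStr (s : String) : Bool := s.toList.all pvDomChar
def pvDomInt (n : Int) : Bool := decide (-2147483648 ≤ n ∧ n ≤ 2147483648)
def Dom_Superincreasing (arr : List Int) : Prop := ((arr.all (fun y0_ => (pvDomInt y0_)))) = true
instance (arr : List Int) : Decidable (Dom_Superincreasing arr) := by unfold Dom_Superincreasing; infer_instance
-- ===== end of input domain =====

-- B replaces A's re-summation of arr[0:i] at every index by a single pass with a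
-- running prefix sum (objective: faster, O(n^2) → O(n)). A's 'except TypeError'
-- branch is unreachable for integer input and is not ported.

-- ===== PORT A =====
-- for i in range(1, len(arr)): if arr[i] <= sum(arr[0:i]): return "false"; return "true"
-- (indices produced by range are in bounds, so arr[i] is pyGetD with default 0)
def SuperLoopA (arr : List Int) : List Int → String
  | [] => "true"
  | i :: rest =>
    if PySem.List.pyGetD arr i 0 ≤ (PySem.List.slice arr (some 0) (some i)).sum then "false"
    else SuperLoopA arr rest

def Superincreasing (arr : List Int) : String :=
  SuperLoopA arr (PySem.List.pyRange 1 (arr.length : Int) 1)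

-- ===== PORT B =====
def SuperLoopB (total : Int) : List Int → String
  | [] => "true"
  | x :: xs => if x ≤ total then "false" else SuperLoopB (total + x) xs

def Superincreasing_alt (arr : List Int) : String :=
  match arr with
  | [] => "true"
  | x :: xs => SuperLoopB x xs

-- ===== PRECONDITION & SPEC =====
def Spec_Superincreasing (arr : List Int) (out : String) : Prop := out = Superincreasing_alt arr
instance (arr : List Int) (out : String) : Decidable (Spec_Superincreasing arr out) := by unfold Spec_Superincreasing; infer_instance

-- ===== CLAIM (what is proved, stated in full; the proofs are below) =====
def Claim_equal_Superincreasing : Prop := ∀ (arr : List Int), Dom_Superincreasing arr → Spec_Superincreasing arr (Superincreasing arr)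

-- ===== LEMMAS AND PROOFS =====

-- Invariant: after the prefix `pre` has been passed, A's loop over the remaining
-- indices equals B's loop carrying `pre.sum`.
lemma superLoop_key (xs : List Int) : ∀ (pre : List Int),
    SuperLoopA (pre ++ xs) (PySem.List.pyRange (pre.length : Int) ((pre ++ xs).length : Int) 1)
      = SuperLoopB pre.sum xs := by
  induction xs with
  | nil =>
    intro pre
    rw [List.append_nil, PySem.List.pyRange_one_eq_nil (le_refl _)]
    rfl
  | cons x xs ih =>
    intro pre
    have hlen : ((pre ++ x :: xs).length : Int) = (pre.length : Int) + 1 + xs.length := by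
      simp; omega
    rw [PySem.List.pyRange_one_cons (by rw [hlen]; omega)]
    have hget : PySem.List.pyGetD (pre ++ x :: xs) (pre.length : Int) 0 = x := by
      rw [PySem.List.pyGetD_natCast]
      simp [List.getD]
    have hslice : PySem.List.slice (pre ++ x :: xs) (some 0) (some (pre.length : Int)) = pre := by
      rw [PySem.List.slice_zero_start, PySem.List.slice_to_natCast]
      exact List.take_left
    show (if PySem.List.pyGetD (pre ++ x :: xs) (pre.length : Int) 0
            ≤ (PySem.List.slice (pre ++ x :: xs) (some 0) (some (pre.length : Int))).sum
          then "false" else _) = _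
    rw [hget, hslice]
    by_cases h : x ≤ pre.sum
    · simp [SuperLoopB, h]
    · have := ih (pre ++ [x])
      rw [List.append_assoc] at this
      simp only [List.cons_append, List.nil_append] at this
      have harg : ((pre ++ [x]).length : Int) = (pre.length : Int) + 1 := by simp
      rw [harg] at this
      simp only [List.sum_append, List.sum_cons, List.sum_nil, add_zero] at this
      rw [if_neg h, SuperLoopB, if_neg h]
      exact this

-- ===== VERDICT (by name: the statement is the Claim_ definition above) =====
theorem Superincreasing_spec : Claim_equal_Superincreasing := by
  intro arr _
  unfold Spec_Superincreasing Superincreasing Superincreasing_alt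
  cases arr with
  | nil => rfl
  | cons x xs =>
    have := superLoop_key xs [x]
    simpa using this
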